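-- pv_equiv track=rewrite | github.com/HanumanKumarAasi/Python-DSA | PracticeStack.py | preToPost
-- ===== SOURCE A (Python) =====
-- def isOperator(ch:str ):
--     if(ch in "+-*/"): return True
--     return False
--
-- def preToPost(s: str) -> str:
--     i=len(s)-1
--     stack=[]
--     while(i>=0):
--         if(isOperator(s[i])):
--             operand1=stack[-1]
--             stack.pop()
--             operand2=stack[-1]
--             stack.pop()
--             newString =  operand1+operand2+s[i]
--             stack.append(newString)
--             i-=1
--         else:
--             stack.append(s[i])
--             i-=1
--     return stack[-1]
-- ===== SOURCE B (Python) =====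
-- def preToPost(s: str) -> str:
--     # Recursive descent over the prefix grammar: parse one expression
--     # starting at index i, return (its postfix form, index after it).
--     def helper(i):
--         ch = s[i]
--         if ch in "+-*/":
--             left, j = helper(i + 1)
--             right, k = helper(j)
--             return left + right + ch, k
--         return ch, i + 1
--
--     return helper(0)[0]
-- ===== Notes on version B (the rewrite author's own statement) =====
-- stated objective: alternative
-- what changed: Replaces the right-to-left explicit-stack evaluation with a left-to-right recursive-descent parser over the prefix grammar (parse operator, recurse for the two operands, return postfix plus next index); it stops once the first complete expression is parsed, while A always scans the whole string.
import Mathlib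
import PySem

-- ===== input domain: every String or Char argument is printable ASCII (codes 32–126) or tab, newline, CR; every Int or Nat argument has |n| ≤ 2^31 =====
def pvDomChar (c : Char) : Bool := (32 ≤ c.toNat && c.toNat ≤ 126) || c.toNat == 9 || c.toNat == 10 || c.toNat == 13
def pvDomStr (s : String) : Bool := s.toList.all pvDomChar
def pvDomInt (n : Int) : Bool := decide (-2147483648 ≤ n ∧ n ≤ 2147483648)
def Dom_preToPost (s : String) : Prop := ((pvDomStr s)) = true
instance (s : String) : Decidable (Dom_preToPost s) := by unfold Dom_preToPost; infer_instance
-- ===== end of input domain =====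

-- B replaces A's right-to-left explicit stack with a left-to-right recursive-descent
-- parser over the prefix grammar (alternative decomposition, same cost).


-- ===== PORT A =====
-- isOperator(ch): ch in "+-*/" (on the single characters A passes it)
def isOperatorA (ch : Char) : Bool := ch == '+' || ch == '-' || ch == '*' || ch == '/'

-- one iteration of A's while-body on the current character; 'none' = IndexError (stack[-1] on empty/one-element stack)
def aStep (stack : List String) (ch : Char) : Option (List String) :=
  if isOperatorA ch then
    match stack with
    | operand1 :: operand2 :: rest => some ((operand1 ++ operand2 ++ ch.toString) :: rest)
    | _ => none
  else
    some (ch.toString :: stack)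

-- A's while loop: i runs len(s)-1 .. 0, i.e. the characters of s in reverse order
def aLoop : List Char → List String → Option (List String)
  | [], stack => some stack
  | c :: cs, stack => (aStep stack c).bind (aLoop cs)

def preToPost (s : String) : String :=
  match aLoop s.toList.reverse [] with
  | some (top :: _) => top          -- return stack[-1]
  | _ => ""                          -- IndexError (excluded by Pre_)

-- ===== PORT B =====
-- helper(i): parse one prefix expression; returned List Char is the remainder s[j:]
-- (the index advance of Source B rendered as the tail of the character list);
-- fuel = length of the whole string bounds the recursion depth and is never exhausted on parses that succeed
def parseF : Nat → List Char → Option (String × List Char)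
  | 0, _ => none
  | _ + 1, [] => none               -- s[i] out of range
  | fuel + 1, c :: cs =>
    if isOperatorA c then
      match parseF fuel cs with
      | none => none
      | some (left, r1) =>
        match parseF fuel r1 with
        | none => none
        | some (right, r2) => some (left ++ right ++ c.toString, r2)
    else
      some (c.toString, cs)

def preToPost_alt (s : String) : String :=
  match parseF s.toList.length s.toList with
  | some (t, _) => t
  | none => ""

-- ===== PRECONDITION & SPEC =====
-- net l = #operands − #operators of l = A's stack size after scanning l (when no underflow occurred)
def net : List Char → Int
  | [] => 0
  | c :: cs => (if isOperatorA c then -1 else 1) + net cs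

-- Pre_ is exactly where A returns: s nonempty and no operator underflows A's stack,
-- i.e. every operator at index i has net (s[i+1:]) ≥ 2.
def Pre_preToPost (s : String) : Prop :=
  s.toList ≠ [] ∧
    ∀ i < s.toList.length, isOperatorA (s.toList.getD i ' ') = true → 2 ≤ net (s.toList.drop (i + 1))
instance (s : String) : Decidable (Pre_preToPost s) := by unfold Pre_preToPost; infer_instance

def pvWitness_preToPost : String := "*+ab-cd"

def Spec_preToPost (s : String) (out : String) : Prop := out = preToPost_alt s
instance (s : String) (out : String) : Decidable (Spec_preToPost s out) := by unfold Spec_preToPost; infer_instance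

-- ===== CLAIM (what is proved, stated in full; the proofs are below) =====
def Claim_equal_preToPost : Prop := ∀ (s : String), Dom_preToPost s → Pre_preToPost s → Spec_preToPost s (preToPost s)

-- ===== LEMMAS AND PROOFS =====

-- 'l parses as one prefix expression with postfix form t and remainder r'
inductive Parses : List Char → String → List Char → Prop
  | leaf (c : Char) (r : List Char) : isOperatorA c = false → Parses (c :: r) c.toString r
  | node (c : Char) (l1 l2 r : List Char) (t1 t2 : String) :
      isOperatorA c = true → Parses l1 t1 l2 → Parses l2 t2 r →
      Parses (c :: l1) (t1 ++ t2 ++ c.toString) r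

-- 'l decomposes into a sequence of prefix expressions with postfix forms ds'
inductive Decomp : List Char → List String → Prop
  | nil : Decomp [] []
  | cons (l r : List Char) (t : String) (ds : List String) :
      Parses l t r → Decomp r ds → Decomp l (t :: ds)

theorem aLoop_append (x y : List Char) (st : List String) :
    aLoop (x ++ y) st = (aLoop x st).bind (fun st' => aLoop y st') := by
  induction x generalizing st with
  | nil => simp [aLoop]
  | cons c cs ih =>
    simp only [List.cons_append, aLoop]
    cases aStep st c with
    | none => simp
    | some st' => simp [ih]

-- A's stack after a full right-to-left scan is the postfix forms of l's decomposition
theorem aLoop_decomp (l : List Char) (st : List String)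
    (h : aLoop l.reverse [] = some st) : Decomp l st := by
  induction l generalizing st with
  | nil => simp [aLoop] at h; subst h; exact Decomp.nil
  | cons c cs ih =>
    rw [List.reverse_cons, aLoop_append] at h
    cases hcs : aLoop cs.reverse [] with
    | none => rw [hcs] at h; simp at h
    | some st0 =>
      rw [hcs] at h
      simp only [Option.bind_some] at h
      have hstep : aStep st0 c = some st := by
        simpa [aLoop] using h
      have hd : Decomp cs st0 := ih st0 hcs
      unfold aStep at hstep
      split at hstep
      next hop =>
        match st0, hd with
        | d1 :: d2 :: rest, hd =>
          simp only [Option.some.injEq] at hstep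
          cases hd with
          | cons _ r1 _ _ hp1 hrest =>
            cases hrest with
            | cons _ r2 _ _ hp2 hrest2 =>
              rw [← hstep]
              exact Decomp.cons _ _ _ _ (Parses.node c _ r1 r2 d1 d2 hop hp1 hp2) hrest2
        | [], hd => simp at hstep
        | [d], hd => simp at hstep
      next hop =>
        simp only [Option.some.injEq] at hstep
        rw [← hstep]
        exact Decomp.cons _ _ _ _ (Parses.leaf c cs (by simpa using hop)) hd

-- under the no-underflow condition the scan succeeds and the stack size is net l
theorem aLoop_ok (l : List Char)
    (h : ∀ i < l.length, isOperatorA (l.getD i ' ') = true → 2 ≤ net (l.drop (i + 1))) :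
    ∃ st, aLoop l.reverse [] = some st ∧ (st.length : Int) = net l := by
  induction l with
  | nil => exact ⟨[], by simp [aLoop, net]⟩
  | cons c cs ih =>
    obtain ⟨st, hst, hlen⟩ := ih (fun i hi hop => by
      have := h (i + 1) (by simpa using Nat.succ_lt_succ hi) (by simpa using hop)
      simpa using this)
    rw [List.reverse_cons, aLoop_append, hst]
    simp only [Option.bind_some]
    by_cases hop : isOperatorA c = true
    · have h2 : 2 ≤ net cs := by
        have := h 0 (by simp) (by simpa using hop)
        simpa using this
      match st, hlen with
      | d1 :: d2 :: rest, hlen =>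
        refine ⟨(d1 ++ d2 ++ c.toString) :: rest, ?_, ?_⟩
        · simp [aLoop, aStep, hop]
        · simp only [List.length_cons] at hlen ⊢
          simp only [net, hop, if_pos]
          push_cast at hlen ⊢
          omega
      | [], hlen => exfalso; simp at hlen; omega
      | [d], hlen => exfalso; simp at hlen; omega
    · refine ⟨c.toString :: st, by simp [aLoop, aStep, hop], ?_⟩
      simp only [net, hop, List.length_cons]
      push_cast
      omega

theorem parses_len {l : List Char} {t : String} {r : List Char} (h : Parses l t r) :
    r.length < l.length := by
  induction h with
  | leaf => simp
  | node c l1 l2 r t1 t2 _ _ _ ih1 ih2 => simp at *; omega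

theorem parses_parseF {l : List Char} {t : String} {r : List Char} (h : Parses l t r) :
    ∀ fuel, l.length ≤ fuel → parseF fuel l = some (t, r) := by
  induction h with
  | leaf c r hc =>
    intro fuel hf
    match fuel with
    | f + 1 => simp [parseF, hc]
  | node c l1 l2 r t1 t2 hc h1 h2 ih1 ih2 =>
    intro fuel hf
    match fuel with
    | f + 1 =>
      have hl1 : l1.length ≤ f := by simp at hf; omega
      have hl2 : l2.length ≤ f := by have := parses_len h1; omega
      simp [parseF, hc, ih1 f hl1, ih2 f hl2]

-- ===== VERDICT (by name: the statement is the Claim_ definition above) =====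
theorem preToPost_spec : Claim_equal_preToPost := by
  intro s _ hpre
  obtain ⟨hne, hcond⟩ := hpre
  obtain ⟨st, hst, _⟩ := aLoop_ok s.toList hcond
  have hdec : Decomp s.toList st := aLoop_decomp s.toList st hst
  unfold Spec_preToPost preToPost preToPost_alt
  generalize hl : s.toList = l at hst hdec hne ⊢
  cases hdec with
  | nil => exact absurd rfl hne
  | cons _ r _ _ hp _ =>
    have hparse := parses_parseF hp l.length (le_refl _)
    rw [hst, hparse]
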